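-- pv_equiv track=rewrite | github.com/nextime/aisbf | classify_keys.py | is_hp_key
-- ===== SOURCE A (Python) =====
-- HP_DOMAINS = {
--     'header', 'nav', 'account_menu', 'notifications', 'footer',
--     'donate', 'welcome', 'contact', 'modal', 'common',
--     'providers', 'rotations', 'autoselect', 'users', 'wallet',
--     'analytics', 'rate_limits', 'billing', 'payments', 'overview',
--     'users_page', 'wallet_page', 'analytics_page', 'rate_limits_page',
--     'login_page', 'signup_page', 'forgot_page', 'reset_page',
--     'profile_page', 'password_page', 'email_page', 'delete_page',
--     'tokens_page', 'billing_page', 'user_overview', 'usage_page',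
--     'prompts_page', 'config_page', 'error_page', 'tiers_page',
--     'cache_page', 'response_cache_page', 'settings_page',
--     'payments_page', 'subscription_page',
--     'user_providers_page', 'user_rotations_page', 'user_autoselects_page',
--     # Also include important keys from these domains regardless of exact path
-- }
--
-- HP_PATTERNS = [
--     'title', 'label', 'button', 'submit', 'cancel', 'delete', 'save',
--     'error', 'success', 'warning', 'notice', 'confirm',
--     'loading', 'no_', 'not_found', 'missing', 'invalid', 'failed',
--     'copy', 'remove', 'add', 'edit', 'search', 'filter', 'refresh',
--     'status', 'active', 'inactive', 'enabled', 'disabled',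
--     'yes', 'no', 'ok', 'back', 'next', 'prev',
--     'minutes_ago', 'hours_ago', 'days_ago',
--     'copied', 'saved', 'saving',
--     '_desc', '_hint', '_placeholder',
--     'email', 'password', 'username',
--     'wallet', 'balance', 'topup', 'deposit',
--     'provider', 'model', 'rotation', 'autoselect',
--     'tier', 'subscription', 'billing',
--     'notification', 'token', 'api',
--     'transaction', 'credit', 'debit',
--     # Time-related placeholders with {n}
--     'seconds', 'minutes_ago', 'hours_ago', 'days_ago', 'resets_in',
--     'result_count', 'models_found',
--     # Common UI actions
--     'send_', 'create_', 'revoke', 'reset',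
-- ]
--
-- def is_hp_key(key, en_val):
--     # Check if key domain is in HP_DOMAINS
--     domain = key.split('.')[0]
--     if domain in HP_DOMAINS:
--         return True
--     # Check if any HP pattern is in key
--     for pattern in HP_PATTERNS:
--         if pattern in key.lower():
--             return True
--     # Short values that are common UI words are HP
--     common_hp_words = [
--         'title', 'subtitle', 'message', 'help', 'docs', 'about',
--         'logout', 'restart', 'edit', 'view', 'manage',
--     ]
--     for w in common_hp_words:
--         if w in key.lower():
--             return True
--     return False
-- ===== SOURCE B (Python) =====
-- # High-priority key classifier: domain check, then a first-character-indexed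
-- # single left-to-right scan over the lowercased key.
--
-- HP_DOMAINS = frozenset({
--     'header', 'nav', 'account_menu', 'notifications', 'footer',
--     'donate', 'welcome', 'contact', 'modal', 'common',
--     'providers', 'rotations', 'autoselect', 'users', 'wallet',
--     'analytics', 'rate_limits', 'billing', 'payments', 'overview',
--     'users_page', 'wallet_page', 'analytics_page', 'rate_limits_page',
--     'login_page', 'signup_page', 'forgot_page', 'reset_page',
--     'profile_page', 'password_page', 'email_page', 'delete_page',
--     'tokens_page', 'billing_page', 'user_overview', 'usage_page',
--     'prompts_page', 'config_page', 'error_page', 'tiers_page',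
--     'cache_page', 'response_cache_page', 'settings_page',
--     'payments_page', 'subscription_page',
--     'user_providers_page', 'user_rotations_page', 'user_autoselects_page',
-- })
--
-- # HP_PATTERNS followed by the common UI words, one delimited string.
-- _PATTERNS = ("title|label|button|submit|cancel|delete|save|error|success|warning|notice|confirm|"
--              "loading|no_|not_found|missing|invalid|failed|copy|remove|add|edit|search|filter|refresh|"
--              "status|active|inactive|enabled|disabled|yes|no|ok|back|next|prev|"
--              "minutes_ago|hours_ago|days_ago|copied|saved|saving|_desc|_hint|_placeholder|"
--              "email|password|username|wallet|balance|topup|deposit|provider|model|rotation|autoselect|"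
--              "tier|subscription|billing|notification|token|api|transaction|credit|debit|"
--              "seconds|minutes_ago|hours_ago|days_ago|resets_in|result_count|models_found|"
--              "send_|create_|revoke|reset|"
--              "title|subtitle|message|help|docs|about|logout|restart|edit|view|manage").split('|')
--
-- # index the patterns by first character once, so the scan only tries
-- # patterns that can possibly start at the current position
-- _INDEX = {}
-- for _p in _PATTERNS:
--     _INDEX.setdefault(_p[0], []).append(_p)
--
--
-- def is_hp_key(key, en_val):
--     if key.split('.')[0] in HP_DOMAINS:
--         return True
--     kl = key.lower()
--     for i, c in enumerate(kl):
--         for p in _INDEX.get(c, ()):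
--             if kl.startswith(p, i):
--                 return True
--     return False
-- ===== Notes on version B (the rewrite author's own statement) =====
-- stated objective: alternative
-- what changed: B keeps the domain check but replaces A's two sequential per-pattern full-key substring scans by a dict index of the patterns keyed by first character, built once at module load, and one left-to-right pass over the lowered key that at each position only tests the bucket of patterns starting with the character found there.
import Mathlib
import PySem

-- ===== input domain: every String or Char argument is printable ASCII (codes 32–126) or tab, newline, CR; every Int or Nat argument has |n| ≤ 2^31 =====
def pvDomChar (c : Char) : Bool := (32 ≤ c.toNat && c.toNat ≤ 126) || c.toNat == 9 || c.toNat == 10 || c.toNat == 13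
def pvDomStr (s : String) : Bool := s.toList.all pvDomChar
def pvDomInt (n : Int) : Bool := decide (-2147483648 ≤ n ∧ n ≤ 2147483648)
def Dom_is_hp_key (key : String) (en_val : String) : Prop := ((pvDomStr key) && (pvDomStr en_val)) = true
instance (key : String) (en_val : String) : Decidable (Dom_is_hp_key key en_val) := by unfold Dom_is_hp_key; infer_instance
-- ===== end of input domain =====

-- B keeps the domain check but replaces A's two per-pattern full-key substring loops by a
-- first-character-indexed dict of the patterns and ONE left-to-right pass over the lowered key,
-- testing at each position only the bucket of patterns that start with the character there.

-- ===== PORT A =====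
def HP_DOMAINS : PySem.Set String := PySem.Set.ofList ["header", "nav", "account_menu", "notifications", "footer", "donate", "welcome", "contact", "modal", "common", "providers", "rotations", "autoselect", "users", "wallet", "analytics", "rate_limits", "billing", "payments", "overview", "users_page", "wallet_page", "analytics_page", "rate_limits_page", "login_page", "signup_page", "forgot_page", "reset_page", "profile_page", "password_page", "email_page", "delete_page", "tokens_page", "billing_page", "user_overview", "usage_page", "prompts_page", "config_page", "error_page", "tiers_page", "cache_page", "response_cache_page", "settings_page", "payments_page", "subscription_page", "user_providers_page", "user_rotations_page", "user_autoselects_page"]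

def HP_PATTERNS : List String := ["title", "label", "button", "submit", "cancel", "delete", "save", "error", "success", "warning", "notice", "confirm", "loading", "no_", "not_found", "missing", "invalid", "failed", "copy", "remove", "add", "edit", "search", "filter", "refresh", "status", "active", "inactive", "enabled", "disabled", "yes", "no", "ok", "back", "next", "prev", "minutes_ago", "hours_ago", "days_ago", "copied", "saved", "saving", "_desc", "_hint", "_placeholder", "email", "password", "username", "wallet", "balance", "topup", "deposit", "provider", "model", "rotation", "autoselect", "tier", "subscription", "billing", "notification", "token", "api", "transaction", "credit", "debit", "seconds", "minutes_ago", "hours_ago", "days_ago", "resets_in", "result_count", "models_found", "send_", "create_", "revoke", "reset"]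

def common_hp_words : List String := ["title", "subtitle", "message", "help", "docs", "about", "logout", "restart", "edit", "view", "manage"]

-- A: domain check, then loop over HP_PATTERNS, then loop over common_hp_words
def is_hp_key (key : String) (en_val : String) : Bool :=
  let domain := ((PySem.Str.split? key ".").getD []).headD ""
  if PySem.Set.contains HP_DOMAINS domain then true
  else if HP_PATTERNS.any (fun pattern => PySem.Str.isIn pattern (PySem.Str.lower key)) then true
  else if common_hp_words.any (fun w => PySem.Str.isIn w (PySem.Str.lower key)) then true
  else false

-- ===== PORT B =====
-- (Source B re-states the same HP_DOMAINS frozenset; ported by sharing the constant above)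

-- Source B's _PATTERNS: one '|'-delimited string (HP_PATTERNS then the common UI words), split once
def hpPatterns : List String := (PySem.Str.split? "title|label|button|submit|cancel|delete|save|error|success|warning|notice|confirm|loading|no_|not_found|missing|invalid|failed|copy|remove|add|edit|search|filter|refresh|status|active|inactive|enabled|disabled|yes|no|ok|back|next|prev|minutes_ago|hours_ago|days_ago|copied|saved|saving|_desc|_hint|_placeholder|email|password|username|wallet|balance|topup|deposit|provider|model|rotation|autoselect|tier|subscription|billing|notification|token|api|transaction|credit|debit|seconds|minutes_ago|hours_ago|days_ago|resets_in|result_count|models_found|send_|create_|revoke|reset|title|subtitle|message|help|docs|about|logout|restart|edit|view|manage" "|").getD []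

-- Source B's _INDEX: buckets of patterns keyed by first character, built once by
-- `_INDEX.setdefault(p[0], []).append(p)`; p[0] is `p.toList.headD ' '` (exact: every pattern is nonempty)
def hpIndex : PySem.Dict Char (List String) :=
  hpPatterns.foldl (fun d p => d.modify (p.toList.headD ' ') [] (· ++ [p])) PySem.Dict.empty

-- B: domain check, then ONE pass over (i, c) = enumerate(lowered key), testing only _INDEX[c];
-- `kl.startswith(p, i)` is ported as: p is a prefix of kl.drop i (exact for the 0 ≤ i < len(kl) used)
def is_hp_key_alt (key : String) (en_val : String) : Bool :=
  if PySem.Set.contains HP_DOMAINS (((PySem.Str.split? key ".").getD []).headD "") then true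
  else
    let kl := (PySem.Str.lower key).toList
    (PySem.List.enumerate kl 0).any (fun q =>
      (hpIndex.getD q.2 []).any (fun p => PySem.Chars.startswith (kl.drop q.1.toNat) p.toList))

-- ===== PRECONDITION & SPEC =====
def Spec_is_hp_key (key : String) (en_val : String) (out : Bool) : Prop := out = is_hp_key_alt key en_val
instance (key : String) (en_val : String) (out : Bool) : Decidable (Spec_is_hp_key key en_val out) := by unfold Spec_is_hp_key; infer_instance

-- ===== CLAIM (what is proved, stated in full; the proofs are below) =====
def Claim_equal_is_hp_key : Prop := ∀ (key : String) (en_val : String), Dom_is_hp_key key en_val → Spec_is_hp_key key en_val (is_hp_key key en_val)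

-- ===== LEMMAS AND PROOFS =====

-- B's delimited pattern string splits to exactly A's two literal lists, concatenated
set_option maxRecDepth 100000 in
set_option maxHeartbeats 2000000 in
lemma patterns_eq : hpPatterns = HP_PATTERNS ++ common_hp_words := by decide

-- every pattern is a nonempty string
lemma patterns_ne_nil : ∀ p ∈ hpPatterns, p.toList ≠ [] := by
  rw [patterns_eq]; decide

-- folding the keyed update over the patterns is folding the pair update over (key p, p) pairs
lemma keyed_foldl_eq_foldl_pairs (l : List String) (d : PySem.Dict Char (List String)) :
    l.foldl (fun d p => d.modify (p.toList.headD ' ') [] (· ++ [p])) d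
      = (l.map (fun p => (p.toList.headD ' ', p))).foldl
          (fun d q => d.modify q.1 [] (· ++ [q.2])) d := by
  induction l generalizing d with
  | nil => rfl
  | cons x xs ih => rw [List.map_cons, List.foldl_cons, List.foldl_cons]; exact ih _

-- the bucket of c holds exactly the patterns whose first character is c
set_option maxRecDepth 100000 in
set_option maxHeartbeats 2000000 in
lemma bucket_eq (c : Char) :
    hpIndex.getD c [] = hpPatterns.filter (fun p => p.toList.headD ' ' == c) := by
  unfold hpIndex
  rw [keyed_foldl_eq_foldl_pairs, PySem.Dict.getD_foldl_modify_append]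
  simp [PySem.Dict.getD_empty, List.filter_map, Function.comp_def]

lemma mem_bucket_iff (c : Char) (p : String) :
    p ∈ hpIndex.getD c [] ↔ p ∈ hpPatterns ∧ p.toList.headD ' ' = c := by
  rw [bucket_eq]
  simp [List.mem_filter]

-- B's indexed positional scan finds a pattern iff some pattern is an infix of kl
lemma scan_eq_any_isIn (kl : List Char) :
    ((PySem.List.enumerate kl 0).any (fun q =>
        (hpIndex.getD q.2 []).any (fun p => PySem.Chars.startswith (kl.drop q.1.toNat) p.toList)))
    = hpPatterns.any (fun p => PySem.Chars.isIn p.toList kl) := by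
  apply Bool.eq_iff_iff.mpr
  simp only [List.any_eq_true, PySem.List.mem_enumerate_iff, PySem.Chars.startswith_iff]
  constructor
  · rintro ⟨q, ⟨k, hk, rfl⟩, p, hpmem, hpre⟩
    obtain ⟨hp, -⟩ := (mem_bucket_iff _ _).mp hpmem
    exact ⟨p, hp, (PySem.Chars.exists_prefix_drop_iff_isIn _ _).mp ⟨(((0:Int) + k).toNat), hpre⟩⟩
  · rintro ⟨p, hp, hin⟩
    obtain ⟨j, hpre⟩ := (PySem.Chars.exists_prefix_drop_iff_isIn _ _).mpr hin
    obtain ⟨h, t, hpl⟩ := List.exists_cons_of_ne_nil (patterns_ne_nil p hp)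
    have hj : j < kl.length := by
      by_contra hle
      have : kl.drop j = [] := List.drop_eq_nil_of_le (by omega)
      exact patterns_ne_nil p hp (List.prefix_nil.mp (this ▸ hpre))
    -- the first character of the match is the character at position j
    obtain ⟨s, hs⟩ := hpre
    have hlen : 0 < (kl.drop j).length := by
      simp only [List.length_drop]; omega
    have hhead : kl[j] = h := by
      have h0 : (kl.drop j)[0]'hlen = kl[j] := by
        rw [List.getElem_drop]
        simp
      have h1 : (kl.drop j)[0]'hlen = h := by
        rw [List.getElem_of_eq hs.symm]
        simp [hpl]
      exact h0.symm.trans h1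
    refine ⟨((0:Int) + j, kl[j]), ⟨j, hj, rfl⟩, p, ?_, ?_⟩
    · exact (mem_bucket_iff _ _).mpr ⟨hp, by rw [hpl, hhead]; rfl⟩
    · have hnat : (((0:Int) + j)).toNat = j := by omega
      rw [hnat]; exact ⟨s, hs⟩

-- the three-way if/return chain of A is a disjunction
lemma if_chain_eq_or (a b : Bool) :
    (if a then true else if b then true else false) = (a || b) := by
  cases a <;> cases b <;> rfl

-- ===== VERDICT (by name: the statement is the Claim_ definition above) =====
theorem is_hp_key_spec : Claim_equal_is_hp_key := by
  intro key en_val _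
  unfold Spec_is_hp_key is_hp_key is_hp_key_alt
  cases hdom : PySem.Set.contains HP_DOMAINS (((PySem.Str.split? key ".").getD []).headD "")
  · simp only [hdom, Bool.false_eq_true, if_false, scan_eq_any_isIn, patterns_eq,
      List.any_append, PySem.Str.isIn_eq, PySem.Str.toList_lower, if_chain_eq_or]
  · simp only [hdom, if_true]
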